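-- pv_equiv track=rewrite | github.com/CaptPyrite/TAML | 3/TASM.py | parse
-- ===== SOURCE A (Python) =====
-- characters = [":", ",", "[", "]", "%", "#", ";"]
--
-- def parse(expression):
--     tokens = []
--     current = ""
--     in_string = False
--
--     i = 0
--     while i < len(expression):
--         c = expression[i]
--
--         # Handle string mode
--         if c == '"':
--             if in_string:
--                 current += c
--                 tokens.append(current)
--                 current = ""
--                 in_string = False
--             else:
--                 if current:
--                     tokens.append(current)
--                     current = ""
--                 current += c
--                 in_string = True
--
--         elif in_string:
--             current += c
--
--         # Handle symbols
--         elif c in characters: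
--             if current:
--                 tokens.append(current)
--                 current = ""
--             tokens.append(c)
--
--         # Handle spaces
--         elif c == " ":
--             if current:
--                 tokens.append(current)
--                 current = ""
--
--         # Normal characters
--         else:
--             current += c
--
--         i += 1
--
--     if current:
--         tokens.append(current)
--
--     return tokens
-- ===== SOURCE B (Python) =====
-- DELIMS = ":,[]%#;"
--
-- def parse(expression):
--     # maximal-munch scanner: consume a whole token per step (quoted string via
--     # str.find, delimiter, or a run of normal characters) instead of a
--     # char-by-char state machine with a current/in_string accumulator.
--     tokens = []
--     i, n = 0, len(expression)
--     while i < n: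
--         c = expression[i]
--         if c == '"':
--             j = expression.find('"', i + 1)
--             if j == -1:
--                 tokens.append(expression[i:])
--                 i = n
--             else:
--                 tokens.append(expression[i:j + 1])
--                 i = j + 1
--         elif c in DELIMS:
--             tokens.append(c)
--             i += 1
--         elif c == ' ':
--             i += 1
--         else:
--             j = i + 1
--             while j < n and expression[j] != '"' and expression[j] not in DELIMS and expression[j] != ' ':
--                 j += 1
--             tokens.append(expression[i:j])
--             i = j
--     return tokens
-- ===== Notes on version B (the rewrite author's own statement) =====
-- stated objective: alternative
-- what changed: Replaced A's char-by-char state machine (current-token accumulator plus in_string flag) with a maximal-munch scanner that emits one whole token per step: a quoted string found via str.find, a single delimiter, or a run of normal characters sliced out at once.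
import Mathlib
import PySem

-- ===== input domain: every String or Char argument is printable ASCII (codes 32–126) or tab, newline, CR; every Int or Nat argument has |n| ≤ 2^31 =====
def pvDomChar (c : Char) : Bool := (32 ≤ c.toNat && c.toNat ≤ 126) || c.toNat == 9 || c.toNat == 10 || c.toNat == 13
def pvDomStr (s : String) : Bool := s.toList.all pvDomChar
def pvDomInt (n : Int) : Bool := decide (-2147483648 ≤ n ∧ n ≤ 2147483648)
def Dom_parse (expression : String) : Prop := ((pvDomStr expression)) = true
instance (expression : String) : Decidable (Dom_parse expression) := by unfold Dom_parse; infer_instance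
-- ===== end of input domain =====

-- B is an alternative maximal-munch scanner (one whole token per step); equivalence of return values with A's char-by-char state machine.

-- ===== PORT A =====
def pvCharsA : List Char := [':', ',', '[', ']', '%', '#', ';']

-- state = (tokens, current, in_string); one iteration of A's while loop
def parseStepA (st : List String × List Char × Bool) (c : Char) : List String × List Char × Bool :=
  let (toks, cur, ins) := st
  if c = '"' then
    if ins then (toks ++ [String.mk (cur ++ ['"'])], [], false)
    else ((if cur ≠ [] then toks ++ [String.mk cur] else toks), ['"'], true)
  else if ins then (toks, cur ++ [c], true)
  else if c ∈ pvCharsA then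
    ((if cur ≠ [] then toks ++ [String.mk cur] else toks) ++ [String.mk [c]], [], false)
  else if c = ' ' then
    ((if cur ≠ [] then toks ++ [String.mk cur] else toks), [], ins)
  else (toks, cur ++ [c], ins)

def parse (expression : String) : List String :=
  let st := expression.toList.foldl parseStepA ([], [], false)
  if st.2.1 ≠ [] then st.1 ++ [String.mk st.2.1] else st.1

-- ===== PORT B =====
def pvDelimsB : List Char := [':', ',', '[', ']', '%', '#', ';']

def pvNormalB (c : Char) : Bool := !(c = '"' || c ∈ pvDelimsB || c = ' ')

def parseB : List Char → List String
  | [] => []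
  | c :: rest =>
    if c = '"' then
      -- quoted string: everything up to (and including) the closing quote, or to the end
      match h : rest.dropWhile (· != '"') with
      | [] => [String.mk ('"' :: rest.takeWhile (· != '"'))]
      | _ :: r => String.mk ('"' :: (rest.takeWhile (· != '"') ++ ['"'])) :: parseB r
    else if c ∈ pvDelimsB then String.mk [c] :: parseB rest
    else if c = ' ' then parseB rest
    else String.mk (c :: rest.takeWhile pvNormalB) :: parseB (rest.dropWhile pvNormalB)
termination_by cs => cs.length
decreasing_by
  · have hd := List.length_dropWhile_le (p := (· != '"')) (l := rest)
    rw [h] at hd; simp at hd ⊢; omega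
  · simp
  · simp
  · have hd := List.length_dropWhile_le (p := pvNormalB) (l := rest)
    simp; omega

def parse_alt (expression : String) : List String := parseB expression.toList

-- ===== PRECONDITION & SPEC =====
def Spec_parse (expression : String) (out : List String) : Prop := out = parse_alt expression
instance (expression : String) (out : List String) : Decidable (Spec_parse expression out) := by unfold Spec_parse; infer_instance

-- ===== CLAIM (what is proved, stated in full; the proofs are below) =====
def Claim_equal_parse : Prop := ∀ (expression : String), Dom_parse expression → Spec_parse expression (parse expression)

-- ===== LEMMAS AND PROOFS =====

-- A's loop, written as a tail recursion that returns the tokens still to be emitted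
def pvRun : List Char → List Char → Bool → List String
  | [], cur, _ => if cur ≠ [] then [String.mk cur] else []
  | c :: cs, cur, ins =>
    if c = '"' then
      if ins then String.mk (cur ++ ['"']) :: pvRun cs [] false
      else (if cur ≠ [] then [String.mk cur] else []) ++ pvRun cs ['"'] true
    else if ins then pvRun cs (cur ++ [c]) true
    else if c ∈ pvCharsA then (if cur ≠ [] then [String.mk cur] else []) ++ String.mk [c] :: pvRun cs [] false
    else if c = ' ' then (if cur ≠ [] then [String.mk cur] else []) ++ pvRun cs [] ins
    else pvRun cs (cur ++ [c]) ins

def pvFinishA (st : List String × List Char × Bool) : List String :=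
  if st.2.1 ≠ [] then st.1 ++ [String.mk st.2.1] else st.1

lemma foldl_eq_run (cs : List Char) : ∀ (toks : List String) (cur : List Char) (ins : Bool),
    pvFinishA (cs.foldl parseStepA (toks, cur, ins)) = toks ++ pvRun cs cur ins := by
  induction cs with
  | nil =>
    intro toks cur ins
    simp only [List.foldl_nil, pvFinishA, pvRun]
    split_ifs <;> simp
  | cons c cs ih =>
    intro toks cur ins
    rw [List.foldl_cons]
    by_cases hq : c = '"'
    · subst hq
      cases ins with
      | true =>
        rw [show parseStepA (toks, cur, true) '"' = (toks ++ [String.mk (cur ++ ['"'])], [], false)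
              from by simp [parseStepA], ih]
        simp [pvRun]
      | false =>
        rw [show parseStepA (toks, cur, false) '"'
              = ((if cur ≠ [] then toks ++ [String.mk cur] else toks), ['"'], true)
              from by simp [parseStepA], ih]
        by_cases hcur : cur = [] <;> simp [pvRun, hcur]
    · cases ins with
      | true =>
        rw [show parseStepA (toks, cur, true) c = (toks, cur ++ [c], true)
              from by simp [parseStepA, hq], ih]
        simp [pvRun, hq]
      | false =>
        by_cases hd : c ∈ pvCharsA
        · rw [show parseStepA (toks, cur, false) c
                = ((if cur ≠ [] then toks ++ [String.mk cur] else toks) ++ [String.mk [c]], [], false)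
                from by simp [parseStepA, hq, hd], ih]
          by_cases hcur : cur = [] <;> simp [pvRun, hq, hd, hcur]
        · by_cases hs : c = ' '
          · subst hs
            rw [show parseStepA (toks, cur, false) ' '
                  = ((if cur ≠ [] then toks ++ [String.mk cur] else toks), [], false)
                  from by simp [parseStepA, hd], ih]
            by_cases hcur : cur = [] <;> simp [pvRun, hd, hcur]
          · rw [show parseStepA (toks, cur, false) c = (toks, cur ++ [c], false)
                  from by simp [parseStepA, hq, hd, hs], ih]
            simp [pvRun, hq, hd, hs]

-- string mode: pvRun gobbles everything up to the closing quote
lemma run_string (cs : List Char) : ∀ (cur : List Char), cur ≠ [] →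
    pvRun cs cur true =
      match cs.dropWhile (· != '"') with
      | [] => [String.mk (cur ++ cs)]
      | _ :: r => String.mk (cur ++ cs.takeWhile (· != '"') ++ ['"']) :: pvRun r [] false := by
  induction cs with
  | nil => intro cur hc; simp [pvRun, hc]
  | cons c cs ih =>
    intro cur hc
    by_cases hq : c = '"'
    · subst hq
      simp [pvRun, List.dropWhile, List.takeWhile]
    · have hb : (c != '"') = true := by simp [hq]
      rw [show pvRun (c :: cs) cur true = pvRun cs (cur ++ [c]) true from by simp [pvRun, hq]]
      rw [ih (cur ++ [c]) (by simp)]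
      rw [List.dropWhile_cons_of_pos (p := fun x => x != '"') (l := cs) hb,
        List.takeWhile_cons_of_pos (p := fun x => x != '"') (l := cs) hb]
      cases cs.dropWhile (· != '"') <;> simp

-- the quoted-string branches coincide
lemma run_quote (cs : List Char)
    (H : ∀ r : List Char, r.length < cs.length → pvRun r [] false = parseB r) :
    pvRun cs ['"'] true = parseB ('"' :: cs) := by
  rw [run_string cs ['"'] (by simp)]
  rw [parseB]
  simp only [if_pos rfl]
  cases h : cs.dropWhile (· != '"') with
  | nil =>
    have ht : cs.takeWhile (· != '"') = cs := by
      conv_rhs => rw [← List.takeWhile_append_dropWhile (p := (· != '"')) (l := cs)]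
      rw [h]; simp
    simp [h, ht]
  | cons x r =>
    have hlen : r.length < cs.length := by
      have hd := List.length_dropWhile_le (p := (· != '"')) (l := cs)
      rw [h] at hd; simp at hd; omega
    simp [h, H r hlen]

lemma pvNormalB_true {c : Char} (hq : c ≠ '"') (hd : c ∉ pvDelimsB) (hs : c ≠ ' ') :
    pvNormalB c = true := by simp [pvNormalB, hq, hd, hs]

lemma charsA_eq_delimsB : pvCharsA = pvDelimsB := rfl

-- main invariant, by strong induction on the length of the remaining input
lemma run_eq_parseB_aux : ∀ n : ℕ,
    (∀ cs : List Char, cs.length ≤ n → pvRun cs [] false = parseB cs) ∧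
    (∀ (cs : List Char) (cur : List Char), cs.length ≤ n → cur ≠ [] →
      pvRun cs cur false =
        String.mk (cur ++ cs.takeWhile pvNormalB) :: parseB (cs.dropWhile pvNormalB)) := by
  intro n
  induction n with
  | zero =>
    constructor
    · intro cs hcs
      have h0 : cs = [] := List.length_eq_zero_iff.mp (Nat.le_zero.mp hcs)
      subst h0; simp [pvRun, parseB]
    · intro cs cur hcs hcur
      have h0 : cs = [] := List.length_eq_zero_iff.mp (Nat.le_zero.mp hcs)
      subst h0; simp [pvRun, parseB, hcur]
  | succ n ih =>
    constructor
    · intro cs hcs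
      match cs with
      | [] => simp [pvRun, parseB]
      | c :: cs' =>
        have hlen : cs'.length ≤ n := by simp at hcs; omega
        by_cases hq : c = '"'
        · subst hq
          rw [show pvRun ('"' :: cs') [] false = pvRun cs' ['"'] true from by simp [pvRun]]
          exact run_quote cs' (fun r hr => ih.1 r (by omega))
        · by_cases hd : c ∈ pvCharsA
          · have hdB : c ∈ pvDelimsB := by rw [← charsA_eq_delimsB]; exact hd
            rw [show pvRun (c :: cs') [] false = String.mk [c] :: pvRun cs' [] false
                  from by simp [pvRun, hq, hd]]
            rw [show parseB (c :: cs') = String.mk [c] :: parseB cs'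
                  from by rw [parseB]; simp [hq, hdB]]
            rw [ih.1 cs' hlen]
          · by_cases hs : c = ' '
            · subst hs
              have hdB : (' ' : Char) ∉ pvDelimsB := by rw [← charsA_eq_delimsB]; exact hd
              rw [show pvRun (' ' :: cs') [] false = pvRun cs' [] false
                    from by simp [pvRun, hd]]
              rw [show parseB (' ' :: cs') = parseB cs' from by rw [parseB]; simp [hdB]]
              exact ih.1 cs' hlen
            · have hdB : c ∉ pvDelimsB := by rw [← charsA_eq_delimsB]; exact hd
              have hnb : pvNormalB c = true := pvNormalB_true hq hdB hs
              rw [show pvRun (c :: cs') [] false = pvRun cs' [c] false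
                    from by simp [pvRun, hq, hd, hs]]
              rw [ih.2 cs' [c] hlen (by simp)]
              rw [show parseB (c :: cs')
                    = String.mk (c :: cs'.takeWhile pvNormalB) :: parseB (cs'.dropWhile pvNormalB)
                    from by rw [parseB]; simp [hq, hdB, hs]]
              simp
    · intro cs cur hcs hcur
      match cs with
      | [] => simp [pvRun, parseB, hcur]
      | c :: cs' =>
        have hlen : cs'.length ≤ n := by simp at hcs; omega
        by_cases hq : c = '"'
        · subst hq
          have hcb : pvNormalB '"' = false := by simp [pvNormalB]
          rw [show pvRun ('"' :: cs') cur false = String.mk cur :: pvRun cs' ['"'] true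
                from by simp [pvRun, hcur]]
          rw [List.takeWhile_cons_of_neg (by simp [hcb]), List.dropWhile_cons_of_neg (by simp [hcb])]
          rw [run_quote cs' (fun r hr => ih.1 r (by omega))]
          simp
        · by_cases hd : c ∈ pvCharsA
          · have hdB : c ∈ pvDelimsB := by rw [← charsA_eq_delimsB]; exact hd
            have hcb : pvNormalB c = false := by simp [pvNormalB, hdB]
            rw [show pvRun (c :: cs') cur false
                  = String.mk cur :: String.mk [c] :: pvRun cs' [] false
                  from by simp [pvRun, hq, hd, hcur]]
            rw [List.takeWhile_cons_of_neg (by simp [hcb]), List.dropWhile_cons_of_neg (by simp [hcb])]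
            rw [show parseB (c :: cs') = String.mk [c] :: parseB cs'
                  from by rw [parseB]; simp [hq, hdB]]
            rw [ih.1 cs' hlen]
            simp
          · by_cases hs : c = ' '
            · subst hs
              have hdB : (' ' : Char) ∉ pvDelimsB := by rw [← charsA_eq_delimsB]; exact hd
              have hcb : pvNormalB ' ' = false := by simp [pvNormalB]
              rw [show pvRun (' ' :: cs') cur false = String.mk cur :: pvRun cs' [] false
                    from by simp [pvRun, hd, hcur]]
              rw [List.takeWhile_cons_of_neg (by simp [hcb]), List.dropWhile_cons_of_neg (by simp [hcb])]
              rw [show parseB (' ' :: cs') = parseB cs' from by rw [parseB]; simp [hdB]]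
              rw [ih.1 cs' hlen]
              simp
            · have hdB : c ∉ pvDelimsB := by rw [← charsA_eq_delimsB]; exact hd
              have hnb : pvNormalB c = true := pvNormalB_true hq hdB hs
              rw [show pvRun (c :: cs') cur false = pvRun cs' (cur ++ [c]) false
                    from by simp [pvRun, hq, hd, hs]]
              rw [ih.2 cs' (cur ++ [c]) hlen (by simp)]
              rw [List.takeWhile_cons_of_pos (by simp [hnb]), List.dropWhile_cons_of_pos (by simp [hnb])]
              simp

-- ===== VERDICT (by name: the statement is the Claim_ definition above) =====
theorem parse_spec : Claim_equal_parse := by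
  intro expression _
  unfold Spec_parse parse parse_alt
  have h1 := foldl_eq_run expression.toList [] [] false
  have h2 := (run_eq_parseB_aux expression.toList.length).1 expression.toList le_rfl
  simpa [pvFinishA, h2] using h1
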